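-- pv_equiv track=rewrite | github.com/ott3r07/binary_ninja_mcp | plugin/utils/number_utils.py | _auto_size_for_value
-- ===== SOURCE A (Python) =====
-- def _fits_unsigned(value: int, size: int) -> bool:
--     if size <= 0:
--         return False
--     return 0 <= value < (1 << (size * 8))
--
-- def _fits_signed(value: int, size: int) -> bool:
--     if size <= 0:
--         return False
--     minv = -(1 << (size * 8 - 1))
--     maxv = (1 << (size * 8 - 1)) - 1
--     return minv <= value <= maxv
--
-- def _auto_size_for_value(value: int, signed: bool) -> int:
--     # Choose 1,2,4,8 to fit
--     for size in (1, 2, 4, 8):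
--         if signed:
--             if _fits_signed(value, size):
--                 return size
--         else:
--             if _fits_unsigned(value, size):
--                 return size
--     return 8
-- ===== SOURCE B (Python) =====
-- def _auto_size_for_value(value: int, signed: bool) -> int:
--     # Arithmetic: compute required byte width from bit_length, no fit-testing loop.
--     if signed:
--         bits = (value if value >= 0 else -value - 1).bit_length() + 1
--     else:
--         if value < 0:
--             return 8
--         bits = value.bit_length()
--     needed = max(1, (bits + 7) // 8)
--     if needed <= 1:
--         return 1
--     if needed <= 2:
--         return 2
--     if needed <= 4:
--         return 4
--     return 8
-- ===== Notes on version B (the rewrite author's own statement) =====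
-- stated objective: simpler
-- what changed: Replaces A's fit-testing loop over the candidate sizes (1,2,4,8) with a direct arithmetic computation: bit_length gives the needed byte width, which is then rounded up to the next allowed size.
import Mathlib
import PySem

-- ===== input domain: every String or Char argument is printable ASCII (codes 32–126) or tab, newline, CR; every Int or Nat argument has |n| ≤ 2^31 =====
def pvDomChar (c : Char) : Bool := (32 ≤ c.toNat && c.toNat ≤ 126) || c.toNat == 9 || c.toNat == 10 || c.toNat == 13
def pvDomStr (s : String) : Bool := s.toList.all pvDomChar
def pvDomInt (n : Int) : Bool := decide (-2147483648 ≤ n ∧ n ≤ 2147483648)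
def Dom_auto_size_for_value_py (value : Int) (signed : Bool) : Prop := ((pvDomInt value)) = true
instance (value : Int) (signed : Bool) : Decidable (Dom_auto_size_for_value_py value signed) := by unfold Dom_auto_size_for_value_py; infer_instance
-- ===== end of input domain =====

-- B replaces A's fit-testing loop over the sizes (1,2,4,8) by a direct bit_length computation (objective: simpler).

-- ===== PORT A =====
def fits_unsigned (value : Int) (size : Int) : Bool :=
  if size ≤ 0 then false
  else decide (0 ≤ value ∧ value < 2 ^ (size * 8).toNat)

def fits_signed (value : Int) (size : Int) : Bool :=
  if size ≤ 0 then false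
  else
    let minv : Int := -(2 ^ (size * 8 - 1).toNat)
    let maxv : Int := 2 ^ (size * 8 - 1).toNat - 1
    decide (minv ≤ value ∧ value ≤ maxv)

-- the 'for size in (1, 2, 4, 8): … return size' loop with its early return; [] ↦ the final 'return 8'
def fitsLoop (value : Int) (signed : Bool) : List Int → Int
  | [] => 8
  | s :: rest =>
    if (if signed then fits_signed value s else fits_unsigned value s) then s
    else fitsLoop value signed rest

def auto_size_for_value_py (value : Int) (signed : Bool) : Int :=
  fitsLoop value signed [1, 2, 4, 8]

-- ===== PORT B =====
-- shared tail of Source B after `bits` is computed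
def autoSizeTail (bits : Int) : Int :=
  let needed := max 1 (PySem.Int.floordiv (bits + 7) 8)
  if needed ≤ 1 then 1
  else if needed ≤ 2 then 2
  else if needed ≤ 4 then 4
  else 8

def auto_size_for_value_py_alt (value : Int) (signed : Bool) : Int :=
  if signed then
    autoSizeTail ((PySem.Int.bitLength (if 0 ≤ value then value else -value - 1) : Int) + 1)
  else if value < 0 then 8
  else autoSizeTail ((PySem.Int.bitLength value : Int))

-- ===== PRECONDITION & SPEC =====
def Spec_auto_size_for_value_py (value : Int) (signed : Bool) (out : Int) : Prop := out = auto_size_for_value_py_alt value signed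
instance (value : Int) (signed : Bool) (out : Int) : Decidable (Spec_auto_size_for_value_py value signed out) := by unfold Spec_auto_size_for_value_py; infer_instance

-- ===== CLAIM (what is proved, stated in full; the proofs are below) =====
def Claim_equal_auto_size_for_value_py : Prop := ∀ (value : Int) (signed : Bool), Dom_auto_size_for_value_py value signed → Spec_auto_size_for_value_py value signed (auto_size_for_value_py value signed)

-- ===== LEMMAS AND PROOFS =====

-- bit_length characterisation: for a nonnegative int, bitLength m ≤ k ↔ m < 2^k
theorem bitLength_le_iff (m : Int) (hm : 0 ≤ m) (k : Nat) :
    PySem.Int.bitLength m ≤ k ↔ m < 2 ^ k := by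
  constructor
  · intro h
    have h1 := PySem.Int.lt_two_pow_bitLength m
    have h3 : m.natAbs < 2 ^ k :=
      lt_of_lt_of_le h1 (Nat.pow_le_pow_right (by norm_num) h)
    have h4 : m = (m.natAbs : Int) := (Int.natAbs_of_nonneg hm).symm
    rw [h4]; exact_mod_cast h3
  · intro h
    by_cases hz : m = 0
    · simp [hz, PySem.Int.bitLength_zero]
    · by_contra hk
      push_neg at hk
      have h5 := PySem.Int.two_pow_bitLength_le m hz
      have h7 : (2 : Nat) ^ k ≤ m.natAbs :=
        le_trans (Nat.pow_le_pow_right (by norm_num) (by omega)) h5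
      have h8 : m = (m.natAbs : Int) := (Int.natAbs_of_nonneg hm).symm
      rw [h8] at h
      have : m.natAbs < 2 ^ k := by exact_mod_cast h
      omega

theorem autoSizeTail_eval (bits : Int) (h : 0 ≤ bits) :
    autoSizeTail bits =
      (if bits ≤ 8 then 1 else if bits ≤ 16 then 2 else if bits ≤ 32 then 4 else 8) := by
  unfold autoSizeTail
  rw [PySem.Int.floordiv_eq_ediv_of_pos (by omega : (0:Int) < 8)]
  dsimp only
  split_ifs <;> omega

-- ===== VERDICT (by name: the statement is the Claim_ definition above) =====
theorem auto_size_for_value_py_spec : Claim_equal_auto_size_for_value_py := by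
  intro value signed hdom
  unfold Dom_auto_size_for_value_py pvDomInt at hdom
  have hb : -2147483648 ≤ value ∧ value ≤ 2147483648 := by simpa using hdom
  unfold Spec_auto_size_for_value_py auto_size_for_value_py auto_size_for_value_py_alt
  cases signed with
  | false =>
    by_cases hneg : value < 0
    · simp only [Bool.false_eq_true, if_false, if_pos hneg]
      simp [fitsLoop, fits_unsigned, show ¬ (0 ≤ value) from by omega]
    · push_neg at hneg
      have h8 := bitLength_le_iff value hneg 8
      have h16 := bitLength_le_iff value hneg 16
      have h32 := bitLength_le_iff value hneg 32
      norm_num at h8 h16 h32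
      simp only [Bool.false_eq_true, if_false, if_neg (by omega : ¬ value < 0)]
      rw [autoSizeTail_eval _ (by positivity)]
      simp only [fitsLoop, fits_unsigned]
      norm_num [show ((8:Int)).toNat = 8 from rfl, show ((16:Int)).toNat = 16 from rfl,
        show ((32:Int)).toNat = 32 from rfl, show ((64:Int)).toNat = 64 from rfl,
        show ((7:Int)).toNat = 7 from rfl, show ((15:Int)).toNat = 15 from rfl,
        show ((31:Int)).toNat = 31 from rfl, show ((63:Int)).toNat = 63 from rfl]
      split_ifs <;> omega
  | true =>
    by_cases hv : 0 ≤ value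
    · have h7 := bitLength_le_iff value hv 7
      have h15 := bitLength_le_iff value hv 15
      have h31 := bitLength_le_iff value hv 31
      norm_num at h7 h15 h31
      rw [if_pos rfl, if_pos hv, autoSizeTail_eval _ (by positivity)]
      simp only [fitsLoop, fits_signed]
      norm_num [show ((8:Int)).toNat = 8 from rfl, show ((16:Int)).toNat = 16 from rfl,
        show ((32:Int)).toNat = 32 from rfl, show ((64:Int)).toNat = 64 from rfl,
        show ((7:Int)).toNat = 7 from rfl, show ((15:Int)).toNat = 15 from rfl,
        show ((31:Int)).toNat = 31 from rfl, show ((63:Int)).toNat = 63 from rfl]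
      split_ifs <;> omega
    · have hm : (0:Int) ≤ -value - 1 := by omega
      have h7 := bitLength_le_iff (-value - 1) hm 7
      have h15 := bitLength_le_iff (-value - 1) hm 15
      have h31 := bitLength_le_iff (-value - 1) hm 31
      norm_num at h7 h15 h31
      rw [if_pos rfl, if_neg hv, autoSizeTail_eval _ (by positivity)]
      simp only [fitsLoop, fits_signed]
      norm_num [show ((8:Int)).toNat = 8 from rfl, show ((16:Int)).toNat = 16 from rfl,
        show ((32:Int)).toNat = 32 from rfl, show ((64:Int)).toNat = 64 from rfl,
        show ((7:Int)).toNat = 7 from rfl, show ((15:Int)).toNat = 15 from rfl,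
        show ((31:Int)).toNat = 31 from rfl, show ((63:Int)).toNat = 63 from rfl]
      split_ifs <;> omega
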